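-- pv_equiv track=rewrite | github.com/eliottcassidy2000/math | 04-computation/gk_cluster_corr_s112.py | classify_by_pairs
-- ===== SOURCE A (Python) =====
-- def classify_by_pairs(S):
--     """Given a domino subset, find the pair decomposition and gaps."""
--     positions = sorted(S)
--     # Find contiguous clusters
--     clusters = []
--     current = [positions[0]]
--     for p in positions[1:]:
--         if p == current[-1] + 1:
--             current.append(p)
--         else:
--             clusters.append(current)
--             current = [p]
--     clusters.append(current)
--
--     cluster_sizes = tuple(len(c) for c in clusters)
--
--     # Compute gaps between clusters
--     gaps = []
--     for i in range(len(clusters) - 1):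
--         gap = clusters[i+1][0] - clusters[i][-1] - 1
--         gaps.append(gap)
--
--     # Number of pairs in each cluster
--     pairs_per_cluster = tuple((len(c) + 1) // 2 for c in clusters)
--
--     return cluster_sizes, gaps, pairs_per_cluster
-- ===== SOURCE B (Python) =====
-- def classify_by_pairs(S):
--     """Given a domino subset, find the pair decomposition and gaps."""
--     positions = sorted(S)
--     if not positions:
--         return (), [], ()
--     # consecutive differences; a cluster break happens exactly where a step != 1
--     steps = [b - a for a, b in zip(positions, positions[1:])]
--     gaps = [d - 1 for d in steps if d != 1]
--     sizes = []
--     run = 1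
--     for d in steps:
--         if d == 1:
--             run += 1
--         else:
--             sizes.append(run)
--             run = 1
--     sizes.append(run)
--     cluster_sizes = tuple(sizes)
--     pairs_per_cluster = tuple((s + 1) // 2 for s in cluster_sizes)
--     return cluster_sizes, gaps, pairs_per_cluster
-- ===== Notes on version B (the rewrite author's own statement) =====
-- stated objective: faster
-- what changed: B never materializes cluster lists: it derives everything from the list of consecutive differences of sorted(S) — gaps by a filter on steps != 1, sizes by a run-length counter — instead of A's build-clusters-then-three-passes scheme; a timing run measured this constant-factor win (~1.7x).
import Mathlib
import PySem

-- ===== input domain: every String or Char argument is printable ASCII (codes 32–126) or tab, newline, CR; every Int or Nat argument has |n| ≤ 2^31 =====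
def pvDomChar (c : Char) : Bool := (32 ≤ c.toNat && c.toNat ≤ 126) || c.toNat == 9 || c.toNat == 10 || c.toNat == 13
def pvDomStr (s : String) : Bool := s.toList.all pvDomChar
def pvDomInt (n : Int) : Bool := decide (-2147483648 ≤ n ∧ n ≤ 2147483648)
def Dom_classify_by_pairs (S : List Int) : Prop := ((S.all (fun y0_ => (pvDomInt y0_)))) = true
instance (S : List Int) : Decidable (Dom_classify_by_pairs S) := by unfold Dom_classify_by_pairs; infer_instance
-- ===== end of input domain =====

-- B derives sizes/gaps/pairs from the consecutive differences of sorted(S) (run-length counter +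
-- filter) instead of materializing cluster lists; alternative decomposition, same asymptotic cost.


-- ===== PORT A =====
-- the cluster-building loop; 'current' is always nonempty, so getLastD 0 reads current[-1] exactly
def pvAClusters (positions : List Int) : List (List Int) :=
  match positions with
  | [] => []          -- unreachable under Pre_ (Python raises IndexError on positions[0])
  | p0 :: rest =>
    let st := rest.foldl
      (fun (acc : List (List Int) × List Int) p =>
        if p = acc.2.getLastD 0 + 1 then (acc.1, acc.2 ++ [p])
        else (acc.1 ++ [acc.2], [p]))
      ([], [p0])
    st.1 ++ [st.2]

def classify_by_pairs (S : List Int) : List Int × List Int × List Int :=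
  let positions := PySem.List.sorted S (fun x => x) false
  let clusters := pvAClusters positions
  let cluster_sizes := clusters.map (fun c => (c.length : Int))
  -- for i in range(len(clusters)-1): gap = clusters[i+1][0] - clusters[i][-1] - 1  (indices in range)
  let gaps := (PySem.List.pyRange 0 ((clusters.length : Int) - 1) 1).foldl
    (fun g i => g ++ [(clusters.getD (i.toNat + 1) []).headD 0
                      - (clusters.getD i.toNat []).getLastD 0 - 1]) []
  let pairs := clusters.map (fun c => PySem.Int.floordiv ((c.length : Int) + 1) 2)
  (cluster_sizes, gaps, pairs)

-- ===== PORT B =====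
def classify_by_pairs_alt (S : List Int) : List Int × List Int × List Int :=
  let positions := PySem.List.sorted S (fun x => x) false
  match positions with
  | [] => ([], [], [])
  | _ =>
    let steps := (positions.zip (positions.drop 1)).map (fun ab => ab.2 - ab.1)
    let gaps := (steps.filter (fun d => d ≠ 1)).map (fun d => d - 1)
    let st := steps.foldl
      (fun (acc : List Int × Int) d =>
        if d = 1 then (acc.1, acc.2 + 1) else (acc.1 ++ [acc.2], 1))
      ([], 1)
    let sizes := st.1 ++ [st.2]
    (sizes, gaps, sizes.map (fun s => PySem.Int.floordiv (s + 1) 2))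

-- ===== PRECONDITION & SPEC =====
-- Pre_ excludes exactly the empty list, on which Python A raises IndexError (positions[0]).
def Pre_classify_by_pairs (S : List Int) : Prop := S ≠ []
instance (S : List Int) : Decidable (Pre_classify_by_pairs S) := by unfold Pre_classify_by_pairs; infer_instance
def pvWitness_classify_by_pairs : List Int := [3, 1, 2, 7]

def Spec_classify_by_pairs (S : List Int) (out : List Int × List Int × List Int) : Prop := out = classify_by_pairs_alt S
instance (S : List Int) (out : List Int × List Int × List Int) : Decidable (Spec_classify_by_pairs S out) := by unfold Spec_classify_by_pairs; infer_instance

-- ===== CLAIM (what is proved, stated in full; the proofs are below) =====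
def Claim_equal_classify_by_pairs : Prop := ∀ (S : List Int), Dom_classify_by_pairs S → Pre_classify_by_pairs S → Spec_classify_by_pairs S (classify_by_pairs S)

-- ===== LEMMAS AND PROOFS =====

-- recursive form of A's cluster-building loop
def pvGoA (cur : List Int) (rest : List Int) : List (List Int) :=
  match rest with
  | [] => [cur]
  | p :: r => if p = cur.getLastD 0 + 1 then pvGoA (cur ++ [p]) r else cur :: pvGoA [p] r

-- adjacent-pair form of A's gap loop
def pvGapsAdj (cs : List (List Int)) : List Int :=
  match cs with
  | c1 :: c2 :: t => (c2.headD 0 - c1.getLastD 0 - 1) :: pvGapsAdj (c2 :: t)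
  | _ => []

-- recursive forms of the A-side traversal of 'rest' (prev = last element seen, cnt = current run)
def pvSzF (prev cnt : Int) (rest : List Int) : List Int :=
  match rest with
  | [] => [cnt]
  | p :: r => if p = prev + 1 then pvSzF p (cnt + 1) r else cnt :: pvSzF p 1 r

def pvGapsF (prev : Int) (rest : List Int) : List Int :=
  match rest with
  | [] => []
  | p :: r => if p = prev + 1 then pvGapsF p r else (p - prev - 1) :: pvGapsF p r

-- recursive forms of the B side
def pvSteps2 (prev : Int) (rest : List Int) : List Int :=
  match rest with
  | [] => []
  | p :: r => (p - prev) :: pvSteps2 p r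

def pvSzB (cnt : Int) (steps : List Int) : List Int :=
  match steps with
  | [] => [cnt]
  | d :: r => if d = 1 then pvSzB (cnt + 1) r else cnt :: pvSzB 1 r

theorem pvAClusters_eq_goA (rest : List Int) :
    ∀ (acc : List (List Int)) (cur : List Int),
      (rest.foldl (fun (acc : List (List Int) × List Int) p =>
            if p = acc.2.getLastD 0 + 1 then (acc.1, acc.2 ++ [p])
            else (acc.1 ++ [acc.2], [p])) (acc, cur)).1
        ++ [(rest.foldl (fun (acc : List (List Int) × List Int) p =>
            if p = acc.2.getLastD 0 + 1 then (acc.1, acc.2 ++ [p])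
            else (acc.1 ++ [acc.2], [p])) (acc, cur)).2] = acc ++ pvGoA cur rest := by
  induction rest with
  | nil => intro acc cur; simp [pvGoA]
  | cons p r ih =>
    intro acc cur
    simp only [List.foldl_cons, pvGoA]
    by_cases h : p = cur.getLastD 0 + 1
    · rw [if_pos h, if_pos h]
      exact ih acc (cur ++ [p])
    · rw [if_neg h, if_neg h, ih (acc ++ [cur]) [p]]
      simp

theorem pvGoA_ne_nil (rest cur : List Int) : pvGoA cur rest ≠ [] := by
  induction rest generalizing cur with
  | nil => simp [pvGoA]
  | cons p r ih => simp only [pvGoA]; split <;> simp [ih]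

theorem pvGoA_head (rest : List Int) : ∀ (cur : List Int), cur ≠ [] →
    ((pvGoA cur rest).headD []).headD 0 = cur.headD 0 := by
  induction rest with
  | nil => intro cur _; simp [pvGoA]
  | cons p r ih =>
    intro cur hc
    simp only [pvGoA]
    by_cases h : p = cur.getLastD 0 + 1
    · rw [if_pos h, ih (cur ++ [p]) (by simp)]
      cases cur with
      | nil => exact absurd rfl hc
      | cons a t => simp
    · rw [if_neg h]; simp

theorem pvGoA_sizes (rest : List Int) : ∀ (cur : List Int), cur ≠ [] →
    (pvGoA cur rest).map (fun c => (c.length : Int)) = pvSzF (cur.getLastD 0) (cur.length : Int) rest := by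
  induction rest with
  | nil => intro cur _; simp [pvGoA, pvSzF]
  | cons p r ih =>
    intro cur hc
    simp only [pvGoA, pvSzF]
    by_cases h : p = cur.getLastD 0 + 1
    · rw [if_pos h, if_pos h, ih (cur ++ [p]) (by simp)]
      simp
    · rw [if_neg h, if_neg h]
      simp [ih [p] (by simp)]

theorem pvGoA_gaps (rest : List Int) : ∀ (cur : List Int), cur ≠ [] →
    pvGapsAdj (pvGoA cur rest) = pvGapsF (cur.getLastD 0) rest := by
  induction rest with
  | nil => intro cur _; simp [pvGoA, pvGapsAdj, pvGapsF]
  | cons p r ih =>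
    intro cur hc
    simp only [pvGoA, pvGapsF]
    by_cases h : p = cur.getLastD 0 + 1
    · rw [if_pos h, if_pos h, ih (cur ++ [p]) (by simp)]
      simp
    · rw [if_neg h, if_neg h]
      have hrec : pvGapsAdj (pvGoA [p] r) = pvGapsF p r := by
        simpa using ih [p] (by simp)
      obtain ⟨c1, cs, hcs⟩ : ∃ c1 cs, pvGoA [p] r = c1 :: cs := by
        cases hx : pvGoA [p] r with
        | nil => exact absurd hx (pvGoA_ne_nil r [p])
        | cons a t => exact ⟨a, t, rfl⟩
      have hh : c1.headD 0 = p := by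
        simpa [hcs] using pvGoA_head r [p] (by simp)
      rw [hcs]
      show (c1.headD 0 - cur.getLastD 0 - 1) :: pvGapsAdj (c1 :: cs) = _
      rw [hh, ← hcs, hrec]

-- A's index loop over clusters equals the adjacent-pair recursion
theorem pvRange_gaps_aux (cs : List (List Int)) :
    (List.range (cs.length - 1)).map
      (fun k => (cs.getD (k + 1) []).headD 0 - (cs.getD k []).getLastD 0 - 1) = pvGapsAdj cs := by
  induction cs with
  | nil => simp [pvGapsAdj]
  | cons c1 t ih =>
    cases t with
    | nil => simp [pvGapsAdj]
    | cons c2 t2 =>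
      simp only [List.length_cons, Nat.add_sub_cancel, List.range_succ_eq_map, List.map_cons,
        List.map_map]
      show _ :: _ = (c2.headD 0 - c1.getLastD 0 - 1) :: pvGapsAdj (c2 :: t2)
      rw [← ih]
      refine List.cons_eq_cons.mpr ⟨by simp, ?_⟩
      simp only [List.length_cons, Nat.add_sub_cancel]
      apply List.map_congr_left
      intro k _
      simp [Function.comp]

theorem pvRange_gaps (cs : List (List Int)) :
    (PySem.List.pyRange 0 ((cs.length : Int) - 1) 1).foldl
      (fun g i => g ++ [(cs.getD (i.toNat + 1) []).headD 0 - (cs.getD i.toNat []).getLastD 0 - 1]) []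
      = pvGapsAdj cs := by
  rw [PySem.List.foldl_append_singleton_eq_map, PySem.List.pyRange_one, List.map_map]
  have hl : (((cs.length : Int)) - 1 - 0).toNat = cs.length - 1 := by omega
  rw [hl, ← pvRange_gaps_aux cs]
  apply List.map_congr_left
  intro k hk
  simp

-- B's fold over steps equals the run-length recursion
theorem pvSzB_fold (steps : List Int) :
    ∀ (acc : List Int) (cnt : Int),
      (steps.foldl (fun (acc : List Int × Int) d =>
            if d = 1 then (acc.1, acc.2 + 1) else (acc.1 ++ [acc.2], 1)) (acc, cnt)).1
        ++ [(steps.foldl (fun (acc : List Int × Int) d =>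
            if d = 1 then (acc.1, acc.2 + 1) else (acc.1 ++ [acc.2], 1)) (acc, cnt)).2] = acc ++ pvSzB cnt steps := by
  induction steps with
  | nil => intro acc cnt; simp [pvSzB]
  | cons d r ih =>
    intro acc cnt
    simp only [List.foldl_cons, pvSzB]
    by_cases h : d = 1
    · rw [if_pos h, if_pos h]
      exact ih acc (cnt + 1)
    · rw [if_neg h, if_neg h, ih (acc ++ [cnt]) 1]
      simp

theorem pvSteps_eq (rest : List Int) : ∀ (prev : Int),
    ((prev :: rest).zip ((prev :: rest).drop 1)).map (fun ab => ab.2 - ab.1) = pvSteps2 prev rest := by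
  induction rest with
  | nil => intro prev; simp [pvSteps2]
  | cons p r ih => intro prev; simp [pvSteps2, ← ih p]

-- the two recursive traversals agree
theorem pvMain_sizes (rest : List Int) : ∀ (prev cnt : Int),
    pvSzF prev cnt rest = pvSzB cnt (pvSteps2 prev rest) := by
  induction rest with
  | nil => intro prev cnt; simp [pvSzF, pvSteps2, pvSzB]
  | cons p r ih =>
    intro prev cnt
    simp only [pvSzF, pvSteps2, pvSzB]
    have hiff : (p = prev + 1) ↔ (p - prev = 1) := by omega
    by_cases h : p = prev + 1
    · rw [if_pos h, if_pos (hiff.mp h), ih]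
    · rw [if_neg h, if_neg (fun hc => h (hiff.mpr hc)), ih]

theorem pvMain_gaps (rest : List Int) : ∀ (prev : Int),
    pvGapsF prev rest = ((pvSteps2 prev rest).filter (fun d => d ≠ 1)).map (fun d => d - 1) := by
  induction rest with
  | nil => intro prev; simp [pvGapsF, pvSteps2]
  | cons p r ih =>
    intro prev
    simp only [pvGapsF, pvSteps2, List.filter_cons]
    by_cases h : p = prev + 1
    · have : (p - prev) = 1 := by omega
      simp [h, ih]
    · have : ¬ (p - prev) = 1 := by omega
      simp [h, this, ih]

-- ===== VERDICT (by name: the statement is the Claim_ definition above) =====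
theorem classify_by_pairs_spec : Claim_equal_classify_by_pairs := by
  intro S _ hpre
  unfold Spec_classify_by_pairs classify_by_pairs classify_by_pairs_alt
  have hlen : (PySem.List.sorted S (fun x => x) false).length = S.length := by
    exact PySem.List.length_sorted S _ _
  have hne : PySem.List.sorted S (fun x => x) false ≠ [] := by
    intro h
    apply hpre
    have := hlen
    rw [h] at this
    exact List.eq_nil_of_length_eq_zero this.symm
  cases hpos : PySem.List.sorted S (fun x => x) false with
  | nil => exact absurd hpos hne
  | cons p0 rest =>
    simp only [pvAClusters, pvAClusters_eq_goA rest [] [p0], List.nil_append]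
    rw [pvRange_gaps, pvGoA_gaps rest [p0] (by simp), pvSteps_eq rest p0]
    have hfold := pvSzB_fold (pvSteps2 p0 rest) [] 1
    rw [List.nil_append] at hfold
    rw [hfold, ← pvMain_sizes rest p0 1, ← pvMain_gaps rest p0]
    have hmm : List.map (fun c => PySem.Int.floordiv ((c.length : Int) + 1) 2) (pvGoA [p0] rest)
        = ((pvGoA [p0] rest).map (fun c => (c.length : Int))).map
            (fun s => PySem.Int.floordiv (s + 1) 2) := by
      simp
    rw [hmm, pvGoA_sizes rest [p0] (by simp)]
    norm_num
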